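-- pv_equiv track=rewrite | github.com/DOH-PNT0303/streamlit_align_and_view_app | alignment_viewer_script.py | read_aligned_fasta_from_string
-- ===== SOURCE A (Python) =====
-- def read_aligned_fasta_from_string(fasta_content):
--     """Read aligned FASTA from string."""
--     sequences = {}
--     current_name = None
--     current_seq = []
--
--     for line in fasta_content.strip().split('\n'):
--         line = line.strip()
--         if line.startswith('>'):
--             if current_name:
--                 sequences[current_name] = ''.join(current_seq)
--             current_name = line[1:]
--             current_seq = []
--         else:
--             current_seq.append(line)
--
--     if current_name:
--         sequences[current_name] = ''.join(current_seq)
--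
--     return sequences
-- ===== SOURCE B (Python) =====
-- def read_aligned_fasta_from_string(fasta_content):
--     """Read aligned FASTA from string (block-scan re-implementation)."""
--     lines = [l.strip() for l in fasta_content.strip().split('\n')]
--     # drop leading non-header lines (ignored by the parser)
--     while lines and not lines[0].startswith('>'):
--         lines = lines[1:]
--     sequences = {}
--     for name, seq in _fasta_blocks(lines):
--         if name:
--             sequences[name] = seq
--     return sequences
--
--
-- def _fasta_blocks(lines):
--     """lines is empty or begins with a header; return (name, joined-seq) blocks."""
--     if not lines:
--         return []
--     j = 1
--     while j < len(lines) and not lines[j].startswith('>'):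
--         j += 1
--     return [(lines[0][1:], ''.join(lines[1:j]))] + _fasta_blocks(lines[j:])
-- ===== Notes on version B (the rewrite author's own statement) =====
-- stated objective: alternative
-- what changed: Replaces A's single pass with a mutable (dict, current_name, current_seq) accumulator by a recursive block scan: strip all lines up front, drop leading non-header lines, recursively cut the line list into (header, following-lines) blocks, and fold the blocks into the dict, skipping empty names.
import Mathlib
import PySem

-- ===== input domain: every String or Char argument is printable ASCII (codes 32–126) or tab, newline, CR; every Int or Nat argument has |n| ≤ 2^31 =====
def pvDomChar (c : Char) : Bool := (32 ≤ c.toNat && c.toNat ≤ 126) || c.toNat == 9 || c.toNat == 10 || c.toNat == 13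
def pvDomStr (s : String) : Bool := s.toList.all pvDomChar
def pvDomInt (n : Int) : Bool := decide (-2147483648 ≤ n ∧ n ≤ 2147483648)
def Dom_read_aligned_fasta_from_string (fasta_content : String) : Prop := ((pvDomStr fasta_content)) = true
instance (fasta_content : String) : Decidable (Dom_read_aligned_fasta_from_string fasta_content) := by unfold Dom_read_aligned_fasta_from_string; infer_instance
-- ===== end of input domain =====

-- B replaces A's running (dict, current_name, current_seq) accumulator loop by a recursive
-- block scan over pre-stripped lines; same result, alternative decomposition (not faster).

-- ===== PORT A =====
-- the for-loop of A, as structural recursion over the lines with the same state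
def loopA (lines : List String) (sequences : PySem.Dict String String)
    (current_name : Option String) (current_seq : List String) : PySem.Dict String String :=
  match lines with
  | [] =>
      -- trailing 'if current_name: sequences[current_name] = ...'
      match current_name with
      | some name => if name ≠ "" then sequences.insert name (PySem.Str.join "" current_seq) else sequences
      | none => sequences
  | line :: rest =>
      let line := PySem.Str.strip line
      if PySem.Str.startswith line ">" then
        let sequences :=
          match current_name with
          | some name => if name ≠ "" then sequences.insert name (PySem.Str.join "" current_seq) else sequences
          | none => sequences
        loopA rest sequences (some (PySem.Str.slice line (some 1) none)) []
      else
        loopA rest sequences current_name (current_seq ++ [line])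

def read_aligned_fasta_from_string (fasta_content : String) : List (String × String) :=
  (loopA ((PySem.Str.split? (PySem.Str.strip fasta_content) "\n").getD []) PySem.Dict.empty none []).items

-- ===== PORT B =====
def notHeader (s : String) : Bool := !(PySem.Str.startswith s ">")

-- '_fasta_blocks' of Source B: cut the line list into (header name, joined body) blocks
def fastaBlocks : List String → List (String × String)
  | [] => []
  | line :: rest =>
      let body := rest.takeWhile notHeader
      (PySem.Str.slice line (some 1) none, PySem.Str.join "" body) :: fastaBlocks (rest.drop body.length)
termination_by l => l.length
decreasing_by simp [List.length_drop]

-- the 'if name: sequences[name] = seq' step of Source B's final loop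
def insName (d : PySem.Dict String String) (p : String × String) : PySem.Dict String String :=
  if p.1 ≠ "" then d.insert p.1 p.2 else d

def read_aligned_fasta_from_string_alt (fasta_content : String) : List (String × String) :=
  let lines := ((PySem.Str.split? (PySem.Str.strip fasta_content) "\n").getD []).map PySem.Str.strip
  let lines := lines.dropWhile notHeader
  ((fastaBlocks lines).foldl insName PySem.Dict.empty).items

-- ===== PRECONDITION & SPEC =====
def Spec_read_aligned_fasta_from_string (fasta_content : String) (out : List (String × String)) : Prop := out = read_aligned_fasta_from_string_alt fasta_content
instance (fasta_content : String) (out : List (String × String)) : Decidable (Spec_read_aligned_fasta_from_string fasta_content out) := by unfold Spec_read_aligned_fasta_from_string; infer_instance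

-- ===== CLAIM (what is proved, stated in full; the proofs are below) =====
def Claim_equal_read_aligned_fasta_from_string : Prop := ∀ (fasta_content : String), Dom_read_aligned_fasta_from_string fasta_content → Spec_read_aligned_fasta_from_string fasta_content (read_aligned_fasta_from_string fasta_content)

-- ===== LEMMAS AND PROOFS =====

lemma fastaBlocks_nil : fastaBlocks [] = [] := by rw [fastaBlocks.eq_def]

lemma fastaBlocks_cons (line : String) (rest : List String) :
    fastaBlocks (line :: rest) =
      (PySem.Str.slice line (some 1) none, PySem.Str.join "" (rest.takeWhile notHeader))
        :: fastaBlocks (rest.drop (rest.takeWhile notHeader).length) := by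
  rw [fastaBlocks.eq_def]

lemma drop_length_takeWhile {α : Type} (p : α → Bool) :
    ∀ l : List α, l.drop (l.takeWhile p).length = l.dropWhile p := by
  intro l
  induction l with
  | nil => rfl
  | cons x xs ih =>
      by_cases h : p x = true
      · simp [h, ih]
      · simp [h]

lemma notHeader_false {s : String} (h : PySem.Str.startswith s ">" = true) :
    notHeader s = false := by
  simp only [notHeader, h, Bool.not_true]

lemma notHeader_true {s : String} (h : ¬ PySem.Str.startswith s ">" = true) :
    notHeader s = true := by
  cases hb : PySem.Str.startswith s ">"
  · simp only [notHeader, hb, Bool.not_false]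
  · exact absurd hb h

lemma loopA_some : ∀ (l : List String) (d : PySem.Dict String String) (name : String)
    (acc : List String),
    loopA l d (some name) acc =
      ((name, PySem.Str.join "" (acc ++ (l.map PySem.Str.strip).takeWhile notHeader))
        :: fastaBlocks ((l.map PySem.Str.strip).dropWhile notHeader)).foldl insName d := by
  intro l
  induction l with
  | nil =>
      intro d name acc
      simp only [loopA, List.map_nil, List.takeWhile_nil, List.dropWhile_nil, fastaBlocks_nil,
        List.append_nil, List.foldl_cons, List.foldl_nil, insName]
  | cons x rest ih =>
      intro d name acc
      simp only [loopA]
      by_cases h : PySem.Str.startswith (PySem.Str.strip x) ">" = true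
      · rw [if_pos h, ih]
        simp only [List.map_cons, List.takeWhile_cons, List.dropWhile_cons,
          notHeader_false h, Bool.false_eq_true, if_false, List.append_nil, List.nil_append]
        rw [fastaBlocks_cons, drop_length_takeWhile]
        simp only [List.foldl_cons, insName]
      · rw [if_neg h, ih]
        simp only [List.map_cons, List.takeWhile_cons, List.dropWhile_cons,
          notHeader_true h, if_true, List.append_assoc, List.cons_append, List.nil_append]

lemma loopA_none : ∀ (l : List String) (d : PySem.Dict String String) (acc : List String),
    loopA l d none acc =
      (fastaBlocks ((l.map PySem.Str.strip).dropWhile notHeader)).foldl insName d := by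
  intro l
  induction l with
  | nil =>
      intro d acc
      simp only [loopA, List.map_nil, List.dropWhile_nil, fastaBlocks_nil, List.foldl_nil]
  | cons x rest ih =>
      intro d acc
      simp only [loopA]
      by_cases h : PySem.Str.startswith (PySem.Str.strip x) ">" = true
      · rw [if_pos h, loopA_some]
        simp only [List.map_cons, List.dropWhile_cons, notHeader_false h,
          Bool.false_eq_true, if_false, List.nil_append]
        rw [fastaBlocks_cons, drop_length_takeWhile]
      · rw [if_neg h, ih]
        simp only [List.map_cons, List.dropWhile_cons, notHeader_true h, if_true]

-- ===== VERDICT (by name: the statement is the Claim_ definition above) =====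
theorem read_aligned_fasta_from_string_spec : Claim_equal_read_aligned_fasta_from_string := by
  intro fasta_content _
  unfold Spec_read_aligned_fasta_from_string read_aligned_fasta_from_string
    read_aligned_fasta_from_string_alt
  rw [loopA_none]
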